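-- pv_equiv track=rewrite | github.com/yukiAshida/ExpensePlatform | app/helpers/seculity_helpers.py | irreversibleTransformation
-- ===== SOURCE A (Python) =====
-- def irreversibleTransformation(pw,c=0,v=1):
--
--     if c>101:
--         return "".join([ (chr(p%75+48)) for p in pw ])
--
--     L = len(pw)
--     nex = [ (len(pw)+pw[i])*pw[i-1]%99991 for i in range(L) ]
--
--     v = 1 if L<7 else (-1 if L>13 else (1 if nex[sum(nex)%L]%2 else -1))
--
--     if v==1:
--         nex += [nex[sum(nex)%L]]
--     elif v==-1:
--         nex.pop(sum(nex)%L)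
--
--     return irreversibleTransformation( nex ,c+1, v)
-- ===== SOURCE B (Python) =====
-- def irreversibleTransformation(pw, c=0, v=1):
--     # iterative loop instead of tail recursion; v recomputed, branch cascade flattened
--     while c <= 101:
--         L = len(pw)
--         nex = [(L + a) * b % 99991 for a, b in zip(pw, pw[-1:] + pw[:-1])]
--         idx = sum(nex) % L
--         if L < 7:
--             nex.append(nex[idx])
--         elif L > 13:
--             nex.pop(idx)
--         elif nex[idx] % 2:
--             nex.append(nex[idx])
--         else:
--             nex.pop(idx)
--         pw = nex
--         c += 1
--     return "".join(chr(p % 75 + 48) for p in pw)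
-- ===== Notes on version B (the rewrite author's own statement) =====
-- stated objective: idiomatic
-- what changed: The 102-step tail recursion becomes an explicit while-loop over (pw, c); the carried v parameter and the nested conditional-expression cascade are dropped in favour of a flat if/elif chain, the repeated sum(nex)%L is computed once per step, and the predecessor pairing pw[i],pw[i-1] is done by zipping pw with its rotation pw[-1:]+pw[:-1] instead of negative indexing.
-- outside the precondition, e.g. on irreversibleTransformation([1, 2, 3], -700, 1): A returns 'q7eW174Rk', B returns 'q7eW174Rk'
import Mathlib
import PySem

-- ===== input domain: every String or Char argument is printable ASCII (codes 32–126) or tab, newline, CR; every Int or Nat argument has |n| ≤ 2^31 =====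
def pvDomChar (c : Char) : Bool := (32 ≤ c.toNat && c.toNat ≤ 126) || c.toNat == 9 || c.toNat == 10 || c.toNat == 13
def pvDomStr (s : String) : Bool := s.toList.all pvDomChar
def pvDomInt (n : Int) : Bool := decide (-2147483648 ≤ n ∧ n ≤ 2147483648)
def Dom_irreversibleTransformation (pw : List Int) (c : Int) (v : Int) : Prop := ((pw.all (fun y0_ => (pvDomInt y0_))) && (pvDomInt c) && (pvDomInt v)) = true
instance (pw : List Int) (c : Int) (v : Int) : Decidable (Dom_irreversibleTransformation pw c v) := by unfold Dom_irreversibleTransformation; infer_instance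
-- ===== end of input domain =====

-- B replaces A's tail recursion (with its carried v parameter and nested conditional expressions)
-- by an explicit iterative loop with a flat branch chain and a zip-with-rotation pairing (objective: idiomatic).

-- ===== PORT A =====
def irreversibleTransformation (pw : List Int) (c : Int) (v : Int) : String :=
  if c > 101 then
    String.mk (pw.map (fun p => Char.ofNat (PySem.Int.mod p 75 + 48).toNat))
  else
    let L : Int := pw.length
    let nex : List Int := (PySem.List.pyRange 0 L 1).map (fun i =>
      PySem.Int.mod ((L + PySem.List.pyGetD pw i 0) * PySem.List.pyGetD pw (i - 1) 0) 99991)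
    let v' : Int :=
      if L < 7 then 1
      else if L > 13 then -1
      else if PySem.Int.mod (PySem.List.pyGetD nex (PySem.Int.mod (nex.foldl (· + ·) 0) L) 0) 2 ≠ 0 then 1 else -1
    let nex2 : List Int :=
      if v' = 1 then nex ++ [PySem.List.pyGetD nex (PySem.Int.mod (nex.foldl (· + ·) 0) L) 0]
      else if v' = -1 then
        (match PySem.List.pop? nex (PySem.Int.mod (nex.foldl (· + ·) 0) L) with
         | some r => r.2
         | none => [])
      else nex
    irreversibleTransformation nex2 (c + 1) v'
termination_by (102 - c).toNat
decreasing_by omega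

-- ===== PORT B =====
def pvLoopB (pw : List Int) (c : Int) : List Int :=
  if c ≤ 101 then
    let L : Int := pw.length
    let nex : List Int := (pw.zip (PySem.List.slice pw (some (-1)) none ++ PySem.List.slice pw none (some (-1)))).map
      (fun ab => PySem.Int.mod ((L + ab.1) * ab.2) 99991)
    let idx : Int := PySem.Int.mod (nex.foldl (· + ·) 0) L
    let nex2 : List Int :=
      if L < 7 then nex ++ [nex.getD idx.toNat 0]
      else if L > 13 then nex.eraseIdx idx.toNat
      else if PySem.Int.mod (nex.getD idx.toNat 0) 2 ≠ 0 then nex ++ [nex.getD idx.toNat 0]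
      else nex.eraseIdx idx.toNat
    pvLoopB nex2 (c + 1)
  else pw
termination_by (102 - c).toNat
decreasing_by omega

def irreversibleTransformation_alt (pw : List Int) (c : Int) (v : Int) : String :=
  String.mk ((pvLoopB pw c).map (fun p => Char.ofNat (PySem.Int.mod p 75 + 48).toNat))


-- ===== PRECONDITION & SPEC =====
-- Pre_ excludes (a) empty pw with c ≤ 101, where both programs raise ZeroDivisionError, and
-- (b) deeply negative c (c < -600), on which A's recursion depth 102-c can exceed Python's
-- recursion limit (RecursionError); the exact interpreter-dependent threshold lies below -600,
-- so a few such c on which A still returns are excluded — see the cite in claim.json.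
def Pre_irreversibleTransformation (pw : List Int) (c : Int) (v : Int) : Prop :=
  -600 ≤ c ∧ (pw ≠ [] ∨ 101 < c)
instance (pw : List Int) (c : Int) (v : Int) : Decidable (Pre_irreversibleTransformation pw c v) := by
  unfold Pre_irreversibleTransformation; infer_instance

def pvWitness_irreversibleTransformation : List Int × Int × Int := ([5], 0, 1)

def Spec_irreversibleTransformation (pw : List Int) (c : Int) (v : Int) (out : String) : Prop := out = irreversibleTransformation_alt pw c v
instance (pw : List Int) (c : Int) (v : Int) (out : String) : Decidable (Spec_irreversibleTransformation pw c v out) := by unfold Spec_irreversibleTransformation; infer_instance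

-- ===== CLAIM (what is proved, stated in full; the proofs are below) =====
def Claim_equal_irreversibleTransformation : Prop := ∀ (pw : List Int) (c : Int) (v : Int), Dom_irreversibleTransformation pw c v → Pre_irreversibleTransformation pw c v → Spec_irreversibleTransformation pw c v (irreversibleTransformation pw c v)

-- ===== LEMMAS AND PROOFS =====

theorem pv_getD_eq (xs : List Int) (i : Int) (h0 : 0 ≤ i) (h1 : i < xs.length) :
    PySem.List.pyGetD xs i 0 = xs.getD i.toNat 0 := by
  rw [PySem.List.pyGetD_eq_getElem xs 0 h0 h1]
  rw [List.getD_eq_getElem?_getD, List.getElem?_eq_getElem (by omega)]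
  rfl

theorem pv_pop_eq (xs : List Int) (i : Int) (h0 : 0 ≤ i) (h1 : i < xs.length) :
    (match PySem.List.pop? xs i with
     | some r => r.2
     | none => ([] : List Int)) = xs.eraseIdx i.toNat := by
  have hi : i = ((i.toNat : Nat) : Int) := (Int.toNat_of_nonneg h0).symm
  rw [hi, PySem.List.pop?_natCast xs i.toNat (by omega)]
  simp only [Int.toNat_natCast]

theorem pv_nex_eq (pw : List Int) (h : pw ≠ []) :
    (PySem.List.pyRange 0 (pw.length : Int) 1).map (fun i =>
      PySem.Int.mod (((pw.length : Int) + PySem.List.pyGetD pw i 0) * PySem.List.pyGetD pw (i - 1) 0) 99991)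
    = (pw.zip (PySem.List.slice pw (some (-1)) none ++ PySem.List.slice pw none (some (-1)))).map
      (fun ab => PySem.Int.mod (((pw.length : Int) + ab.1) * ab.2) 99991) := by
  have hlen : 0 < pw.length := List.length_pos_iff.mpr h
  rw [PySem.List.slice_from_neg_one, PySem.List.slice_to_neg_one]
  have hd : (List.drop (pw.length - 1) pw).length = 1 := by simp; omega
  apply List.ext_getElem
  · simp only [List.length_map, PySem.List.length_pyRange_one, List.length_zip,
      List.length_append, List.length_drop, List.length_dropLast]
    omega
  · intro k hk1 hk2
    have hklt : k < pw.length := by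
      simpa [PySem.List.length_pyRange_one] using hk1
    have hk2' : k < (List.drop (pw.length - 1) pw ++ pw.dropLast).length := by
      simp only [List.length_append, List.length_drop, List.length_dropLast]
      omega
    simp only [List.getElem_map, List.getElem_zip]
    rw [PySem.List.getElem_pyRange_one 0 (pw.length : Int) k (by
      simpa [PySem.List.length_pyRange_one] using hklt), zero_add]
    have ha : PySem.List.pyGetD pw ((k : Int)) 0 = pw[k] := by
      rw [PySem.List.pyGetD_natCast, List.getD_eq_getElem?_getD, List.getElem?_eq_getElem hklt]
      rfl
    have hb : PySem.List.pyGetD pw ((k : Int) - 1) 0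
        = (List.drop (pw.length - 1) pw ++ pw.dropLast)[k]'hk2' := by
      rcases Nat.eq_zero_or_pos k with hk0 | hkpos
      · subst hk0
        rw [show ((0 : Nat) : Int) - 1 = (-1 : Int) by decide]
        rw [PySem.List.pyGetD_neg_one pw 0 h]
        rw [List.getElem_append_left (by rw [hd]; omega)]
        rw [List.getElem_drop]
        rw [List.getLast_eq_getElem]
        congr 1
        try omega
      · have hcast : ((k : Int)) - 1 = (((k - 1 : Nat)) : Int) := by omega
        rw [hcast, PySem.List.pyGetD_natCast]
        rw [List.getElem_append_right (by rw [hd]; omega)]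
        rw [List.getD_eq_getElem?_getD, List.getElem?_eq_getElem (by omega)]
        simp only [Option.getD_some]
        rw [List.getElem_dropLast]
        congr 1
        rw [hd]
    rw [ha, hb]

theorem pv_main (n : Nat) : ∀ (pw : List Int) (c v : Int), (102 - c).toNat ≤ n → pw ≠ [] →
    irreversibleTransformation pw c v = irreversibleTransformation_alt pw c v := by
  induction n with
  | zero =>
    intro pw c v hn hpw
    have hc : c > 101 := by omega
    rw [irreversibleTransformation, irreversibleTransformation_alt, pvLoopB]
    rw [if_pos hc, if_neg (by omega)]
  | succ m ih =>
    intro pw c v hn hpw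
    by_cases hc : c > 101
    · rw [irreversibleTransformation, irreversibleTransformation_alt, pvLoopB]
      rw [if_pos hc, if_neg (by omega)]
    · have hL : 0 < pw.length := List.length_pos_iff.mpr hpw
      rw [irreversibleTransformation, if_neg hc]
      rw [irreversibleTransformation_alt, pvLoopB, if_pos (by omega : c ≤ 101)]
      simp only [pv_nex_eq pw hpw]
      set nex : List Int := (pw.zip (PySem.List.slice pw (some (-1)) none ++ PySem.List.slice pw none (some (-1)))).map
        (fun ab => PySem.Int.mod (((pw.length : Int) + ab.1) * ab.2) 99991) with hnexdef
      have hnexlen : nex.length = pw.length := by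
        rw [hnexdef, PySem.List.slice_from_neg_one, PySem.List.slice_to_neg_one]
        simp only [List.length_map, List.length_zip, List.length_append, List.length_drop,
          List.length_dropLast]
        omega
      set idx : Int := PySem.Int.mod (nex.foldl (· + ·) 0) (pw.length : Int) with hidxdef
      have hidx0 : 0 ≤ idx := PySem.Int.mod_nonneg _ (by exact_mod_cast hL)
      have hidx1 : idx < (pw.length : Int) := PySem.Int.mod_lt _ (by exact_mod_cast hL)
      have hget : PySem.List.pyGetD nex idx 0 = nex.getD idx.toNat 0 :=
        pv_getD_eq nex idx hidx0 (by omega)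
      have hpop : (match PySem.List.pop? nex idx with
          | some r => r.2
          | none => ([] : List Int)) = nex.eraseIdx idx.toNat :=
        pv_pop_eq nex idx hidx0 (by omega)
      have herase_len : (nex.eraseIdx idx.toNat).length = pw.length - 1 := by
        rw [List.length_eraseIdx_of_lt (by omega)]
        omega
      have tneg : ¬ ((-1 : Int) = 1) := by decide
      by_cases h7 : (pw.length : Int) < 7
      · simp only [if_pos h7, hget]
        exact ih (nex ++ [nex.getD idx.toNat 0]) (c + 1) 1 (by omega) (by simp)
      · by_cases h13 : (pw.length : Int) > 13
        · simp only [if_neg h7, if_pos h13, if_neg tneg, hpop]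
          exact ih (nex.eraseIdx idx.toNat) (c + 1) (-1) (by omega) (by
            intro hemp
            rw [hemp] at herase_len
            simp at herase_len
            omega)
        · simp only [if_neg h7, if_neg h13, hget]
          by_cases hodd : PySem.Int.mod (nex.getD idx.toNat 0) 2 ≠ 0
          · simp only [if_pos hodd]
            exact ih (nex ++ [nex.getD idx.toNat 0]) (c + 1) 1 (by omega) (by simp)
          · simp only [if_neg hodd, if_neg tneg, hpop]
            exact ih (nex.eraseIdx idx.toNat) (c + 1) (-1) (by omega) (by
              intro hemp
              rw [hemp] at herase_len
              simp at herase_len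
              omega)

-- ===== VERDICT (by name: the statement is the Claim_ definition above) =====
theorem irreversibleTransformation_spec : Claim_equal_irreversibleTransformation := by
  intro pw c v _ hpre
  unfold Spec_irreversibleTransformation
  rcases hpre with ⟨hc, hpw | hc101⟩
  · exact pv_main (102 - c).toNat pw c v le_rfl hpw
  · rw [irreversibleTransformation, irreversibleTransformation_alt, pvLoopB]
    rw [if_pos hc101, if_neg (by omega)]
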